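-- pv_equiv track=rewrite | github.com/shlok923/ocean | q50.py | sfc
-- ===== SOURCE A (Python) =====
-- def change(s,L):             #to change coordinates according to clockwise and anti-clockwise.
-- 	cs=''                    #for example, for clockwise D-L are exchanged
-- 	for i in s:              #if even index, add next element to new string. otherwise, add previous element
-- 		ind=L.index(i)       #check index of element
-- 		if ind%2==0:
-- 			cs+=L[ind+1]
-- 		else:
-- 			cs+=L[ind-1]
-- 	return cs                #return changed string
--
-- def anticlock(s):            #anticlock rotate function
-- 	L=['L','U','D','R']      # L-U and D-R interchange
-- 	return change(s,L)
--
-- def clock(s):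
-- 	L=['R','U','D','L']      # R-U and D-L interchange
-- 	return change(s,L)
--
-- def dir_pattern(n: int):         #main directional pattern function
-- 	pattern='DRU'            #starting point
-- 	i=1                      #variable for loop
-- 	if n==1:                 #return starting pattern for n=1
-- 		return pattern
-- 	else:
-- 		while i<n:
-- 		   i+=1
-- 		   pattern=anticlock(pattern)+'D'+pattern+'R'+pattern+'U'+clock(pattern)     #else, algorithm is to rotate anticlock, connect to original, connect to original, connect to clock
-- 	return pattern                                                                   #return resultant pattern
--
-- def sfc(n):                                #main function
--     s=dir_pattern(n)
--     L=[(1,1)]                              #starting point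
--     x=L[len(L)-1][0]                       #x-coord of last element of list
--     y=L[len(L)-1][1]                       #y-coord of last element of list
--     for i in s:                            #changing coords according to directions and appending to output list
--         if i=='D':
--             L.append((x+1,y))
--         elif i=='R':
--             L.append((x,y+1))
--         elif i=='U':
--             L.append((x-1,y))
--         elif i=='L':
--             L.append((x,y-1))
--         x=L[len(L)-1][0]                  #redefining x and y to be last elements again
--         y=L[len(L)-1][1]
--     return L		                          #return list of tuples
-- ===== SOURCE B (Python) =====
-- def sfc(n):
--     aclk = str.maketrans('LUDR', 'ULRD')  # anticlock: L<->U, D<->R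
--     clk = str.maketrans('RUDL', 'URLD')   # clock:     R<->U, D<->L
--
--     def pat(k):
--         if k <= 1:
--             return 'DRU'
--         p = pat(k - 1)
--         return p.translate(aclk) + 'D' + p + 'R' + p + 'U' + p.translate(clk)
--
--     delta = {'D': (1, 0), 'R': (0, 1), 'U': (-1, 0), 'L': (0, -1)}
--     x, y = 1, 1
--     out = [(x, y)]
--     for c in pat(n):
--         dx, dy = delta[c]
--         x, y = x + dx, y + dy
--         out.append((x, y))
--     return out
-- ===== Notes on version B (the rewrite author's own statement) =====
-- stated objective: alternative
-- what changed: dir_pattern's iterative while-loop with index-based clock/anticlock string rewriting is replaced by a direct recursion over the fractal level using str.translate character maps, and the coordinate trace threads running x,y through a delta table instead of re-reading the last element of the output list.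
import Mathlib
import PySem

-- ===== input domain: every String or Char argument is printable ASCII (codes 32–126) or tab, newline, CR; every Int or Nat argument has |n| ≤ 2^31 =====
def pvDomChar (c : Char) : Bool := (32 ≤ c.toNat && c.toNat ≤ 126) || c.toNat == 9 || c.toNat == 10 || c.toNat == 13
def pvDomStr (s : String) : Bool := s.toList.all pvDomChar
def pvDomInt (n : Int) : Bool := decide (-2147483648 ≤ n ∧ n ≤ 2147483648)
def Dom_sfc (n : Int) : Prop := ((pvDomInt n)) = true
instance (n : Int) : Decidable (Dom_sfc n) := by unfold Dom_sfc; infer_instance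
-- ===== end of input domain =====

-- B replaces the iterative dir_pattern loop (index-based clock/anticlock rewriting) by a direct
-- recursion over the level with per-character translation maps, and threads x,y through the trace
-- instead of re-reading the last list element; same values, no speed claim.

-- ===== PORT A =====
-- change(s, L): Python raises ValueError when a char of s is not in L; inside sfc every char is in
-- L, so the .getD defaults below are never read on any input of sfc (exact there).
def changeA (s : List Char) (L : List Char) : List Char :=
  s.foldl (fun cs i =>
    let ind : Nat := (PySem.List.index? L i).getD 0
    if ind % 2 = 0 then cs ++ [(PySem.List.pyGet? L ((ind : Int) + 1)).getD ' ']
    else cs ++ [(PySem.List.pyGet? L ((ind : Int) - 1)).getD ' ']) []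

def anticlockA (s : List Char) : List Char := changeA s ['L','U','D','R']

def clockA (s : List Char) : List Char := changeA s ['R','U','D','L']

-- the while-loop of dir_pattern: runs max(n-1, 0) times, fuel = (n-1).toNat
def dirLoopA : Nat → List Char → List Char
  | 0, p => p
  | k+1, p => dirLoopA k (anticlockA p ++ ['D'] ++ p ++ ['R'] ++ p ++ ['U'] ++ clockA p)

def dir_patternA (n : Int) : List Char :=
  if n = 1 then ['D','R','U'] else dirLoopA (n - 1).toNat ['D','R','U']

def sfc (n : Int) : List (Int × Int) :=
  let s := dir_patternA n
  (s.foldl (fun (st : List (Int × Int) × Int × Int) i =>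
      let L := st.1
      let x := st.2.1
      let y := st.2.2
      let L' := if i = 'D' then L ++ [(x+1, y)]
                else if i = 'R' then L ++ [(x, y+1)]
                else if i = 'U' then L ++ [(x-1, y)]
                else if i = 'L' then L ++ [(x, y-1)]
                else L
      let last := (PySem.List.pyGet? L' ((L'.length : Int) - 1)).getD (0, 0)
      (L', last.1, last.2)) ([(1,1)], 1, 1)).1

-- ===== PORT B =====
def aclkB (c : Char) : Char :=
  if c = 'L' then 'U' else if c = 'U' then 'L' else if c = 'D' then 'R' else if c = 'R' then 'D' else c

def clkB (c : Char) : Char :=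
  if c = 'R' then 'U' else if c = 'U' then 'R' else if c = 'D' then 'L' else if c = 'L' then 'D' else c

-- pat(k): recursion over the level; Python's base case covers every k ≤ 1, hence fuel (n-1).toNat
def patB : Nat → List Char
  | 0 => ['D','R','U']
  | k+1 =>
      let p := patB k
      p.map aclkB ++ ['D'] ++ p ++ ['R'] ++ p ++ ['U'] ++ p.map clkB

def deltaB (c : Char) : Int × Int :=
  if c = 'D' then (1, 0) else if c = 'R' then (0, 1) else if c = 'U' then (-1, 0) else (0, -1)

def sfc_alt (n : Int) : List (Int × Int) :=
  ((patB (n - 1).toNat).foldl (fun (st : List (Int × Int) × Int × Int) c =>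
      let d := deltaB c
      let x := st.2.1 + d.1
      let y := st.2.2 + d.2
      (st.1 ++ [(x, y)], x, y)) ([(1,1)], 1, 1)).1

-- ===== PRECONDITION & SPEC =====
def Spec_sfc (n : Int) (out : List (Int × Int)) : Prop := out = sfc_alt n
instance (n : Int) (out : List (Int × Int)) : Decidable (Spec_sfc n out) := by unfold Spec_sfc; infer_instance

-- ===== CLAIM (what is proved, stated in full; the proofs are below) =====
def Claim_equal_sfc : Prop := ∀ (n : Int), Dom_sfc n → Spec_sfc n (sfc n)

-- ===== LEMMAS AND PROOFS =====

-- characters that can occur in a direction pattern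
def goodC (c : Char) : Prop := c = 'D' ∨ c = 'R' ∨ c = 'U' ∨ c = 'L'

def Good (s : List Char) : Prop := ∀ c ∈ s, goodC c

lemma good_cons_head {c : Char} {s : List Char} (h : Good (c :: s)) : goodC c :=
  h c List.mem_cons_self

lemma good_cons_tail {c : Char} {s : List Char} (h : Good (c :: s)) : Good s :=
  fun d hd => h d (List.mem_cons_of_mem _ hd)

lemma anticlock_foldl : ∀ (s : List Char) (acc : List Char), Good s →
    s.foldl (fun cs i =>
      let ind : Nat := (PySem.List.index? ['L','U','D','R'] i).getD 0
      if ind % 2 = 0 then cs ++ [(PySem.List.pyGet? ['L','U','D','R'] ((ind : Int) + 1)).getD ' ']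
      else cs ++ [(PySem.List.pyGet? ['L','U','D','R'] ((ind : Int) - 1)).getD ' ']) acc
    = acc ++ s.map aclkB := by
  intro s
  induction s with
  | nil => intro acc _; simp
  | cons c s ih =>
    intro acc h
    rw [List.foldl_cons]
    have hstep : (let ind : Nat := (PySem.List.index? ['L','U','D','R'] c).getD 0
        if ind % 2 = 0 then acc ++ [(PySem.List.pyGet? ['L','U','D','R'] ((ind : Int) + 1)).getD ' ']
        else acc ++ [(PySem.List.pyGet? ['L','U','D','R'] ((ind : Int) - 1)).getD ' '])
        = acc ++ [aclkB c] := by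
      rcases good_cons_head h with h1 | h1 | h1 | h1 <;> subst h1 <;> rfl
    rw [hstep, ih _ (good_cons_tail h)]
    simp [aclkB]

lemma clock_foldl : ∀ (s : List Char) (acc : List Char), Good s →
    s.foldl (fun cs i =>
      let ind : Nat := (PySem.List.index? ['R','U','D','L'] i).getD 0
      if ind % 2 = 0 then cs ++ [(PySem.List.pyGet? ['R','U','D','L'] ((ind : Int) + 1)).getD ' ']
      else cs ++ [(PySem.List.pyGet? ['R','U','D','L'] ((ind : Int) - 1)).getD ' ']) acc
    = acc ++ s.map clkB := by
  intro s
  induction s with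
  | nil => intro acc _; simp
  | cons c s ih =>
    intro acc h
    rw [List.foldl_cons]
    have hstep : (let ind : Nat := (PySem.List.index? ['R','U','D','L'] c).getD 0
        if ind % 2 = 0 then acc ++ [(PySem.List.pyGet? ['R','U','D','L'] ((ind : Int) + 1)).getD ' ']
        else acc ++ [(PySem.List.pyGet? ['R','U','D','L'] ((ind : Int) - 1)).getD ' '])
        = acc ++ [clkB c] := by
      rcases good_cons_head h with h1 | h1 | h1 | h1 <;> subst h1 <;> rfl
    rw [hstep, ih _ (good_cons_tail h)]
    simp [clkB]

lemma anticlockA_eq_map (s : List Char) (h : Good s) : anticlockA s = s.map aclkB := by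
  have := anticlock_foldl s [] h
  simpa [anticlockA, changeA] using this

lemma clockA_eq_map (s : List Char) (h : Good s) : clockA s = s.map clkB := by
  have := clock_foldl s [] h
  simpa [clockA, changeA] using this

lemma goodC_maps (d : Char) (hd : goodC d) : goodC (aclkB d) ∧ goodC (clkB d) := by
  rcases hd with h | h | h | h <;> subst h <;>
    exact ⟨by simp [goodC, aclkB], by simp [goodC, clkB]⟩

lemma good_patB : ∀ k, Good (patB k) := by
  intro k
  induction k with
  | zero =>
    intro c hc
    fin_cases hc
    · exact Or.inl rfl
    · exact Or.inr (Or.inl rfl)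
    · exact Or.inr (Or.inr (Or.inl rfl))
  | succ k ih =>
    intro c hc
    simp only [patB, List.mem_append] at hc
    rcases hc with ((((((hc | hc) | hc) | hc) | hc) | hc) | hc)
    · obtain ⟨d, hd, rfl⟩ := List.mem_map.mp hc
      exact (goodC_maps d (ih d hd)).1
    · rw [List.mem_singleton] at hc; subst hc; exact Or.inl rfl
    · exact ih c hc
    · rw [List.mem_singleton] at hc; subst hc; exact Or.inr (Or.inl rfl)
    · exact ih c hc
    · rw [List.mem_singleton] at hc; subst hc; exact Or.inr (Or.inr (Or.inl rfl))
    · obtain ⟨d, hd, rfl⟩ := List.mem_map.mp hc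
      exact (goodC_maps d (ih d hd)).2

lemma stepA_patB (m : Nat) :
    anticlockA (patB m) ++ ['D'] ++ patB m ++ ['R'] ++ patB m ++ ['U'] ++ clockA (patB m)
    = patB (m + 1) := by
  rw [anticlockA_eq_map _ (good_patB m), clockA_eq_map _ (good_patB m)]
  simp [patB]

lemma dirLoopA_patB : ∀ k m, dirLoopA k (patB m) = patB (k + m) := by
  intro k
  induction k with
  | zero => intro m; simp [dirLoopA]
  | succ k ih =>
    intro m
    show dirLoopA k (anticlockA (patB m) ++ ['D'] ++ patB m ++ ['R'] ++ patB m ++ ['U'] ++ clockA (patB m)) = _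
    rw [stepA_patB, ih (m + 1)]
    congr 1
    omega

lemma dir_patternA_eq (n : Int) : dir_patternA n = patB (n - 1).toNat := by
  unfold dir_patternA
  split_ifs with h
  · subst h; rfl
  · have := dirLoopA_patB (n - 1).toNat 0
    simpa [patB] using this

-- the two trace-loop bodies, named so the fold lemma can be stated once
def stepAfn (st : List (Int × Int) × Int × Int) (i : Char) : List (Int × Int) × Int × Int :=
  let L := st.1
  let x := st.2.1
  let y := st.2.2
  let L' := if i = 'D' then L ++ [(x+1, y)]
            else if i = 'R' then L ++ [(x, y+1)]
            else if i = 'U' then L ++ [(x-1, y)]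
            else if i = 'L' then L ++ [(x, y-1)]
            else L
  let last := (PySem.List.pyGet? L' ((L'.length : Int) - 1)).getD (0, 0)
  (L', last.1, last.2)

def stepBfn (st : List (Int × Int) × Int × Int) (c : Char) : List (Int × Int) × Int × Int :=
  let d := deltaB c
  let x := st.2.1 + d.1
  let y := st.2.2 + d.2
  (st.1 ++ [(x, y)], x, y)

lemma last_append (L : List (Int × Int)) (a : Int × Int) :
    (PySem.List.pyGet? (L ++ [a]) (((L ++ [a]).length : Int) - 1)).getD (0, 0) = a := by
  have h : (((L ++ [a]).length : Int) - 1) = ((L.length : Nat) : Int) := by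
    simp
  rw [h, PySem.List.pyGet?_append_length]
  rfl

lemma fold_eq : ∀ (s : List Char), Good s → ∀ (st : List (Int × Int) × Int × Int),
    s.foldl stepAfn st = s.foldl stepBfn st := by
  intro s
  induction s with
  | nil => intro _ _; rfl
  | cons c s ih =>
    intro h st
    rw [List.foldl_cons, List.foldl_cons]
    have hstep : stepAfn st c = stepBfn st c := by
      obtain ⟨L, x, y⟩ := st
      rcases good_cons_head h with h1 | h1 | h1 | h1 <;> subst h1 <;>
        simp [stepAfn, stepBfn, deltaB, last_append] <;> omega
    rw [hstep]
    exact ih (good_cons_tail h) _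

-- ===== VERDICT (by name: the statement is the Claim_ definition above) =====
theorem sfc_spec : Claim_equal_sfc := by
  intro n _
  show (List.foldl stepAfn ([(1,1)], 1, 1) (dir_patternA n)).1
      = (List.foldl stepBfn ([(1,1)], 1, 1) (patB (n - 1).toNat)).1
  rw [dir_patternA_eq, fold_eq _ (good_patB _)]
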